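-- pv_equiv track=rewrite | github.com/danieleschmidt/pde-fluid-phi | security_scan_enhanced.py | _contains_secrets
-- ===== SOURCE A (Python) =====
-- def _contains_secrets(content: str) -> bool:
--     """Check if content contains potential secrets"""
--     content_lower = content.lower()
--
--     # Simple heuristics for secret detection
--     secret_indicators = [
--         'password=', 'secret=', 'key=', 'token=',
--         'api_key=', 'auth_token=', 'private_key='
--     ]
--
--     for indicator in secret_indicators:
--         if indicator in content_lower:
--             # Check if it's not just a placeholder
--             lines = content.split('\n')
--             for line in lines:
--                 if indicator in line.lower():
--                     # Simple check for actual values vs placeholders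
--                     if any(placeholder in line.lower() for placeholder in
--                            ['placeholder', 'example', 'your_', 'insert_', 'changeme']):
--                         continue
--                     return True
--
--     return False
-- ===== SOURCE B (Python) =====
-- def _contains_secrets(content: str) -> bool:
--     """Check if content contains potential secrets.
--
--     Staged pipeline: lowercase once, drop every line that mentions a
--     placeholder token, rejoin the remaining lines, then run one substring
--     test per indicator over that filtered text.  No indicator contains a
--     newline, so a match in the rejoined text is a match inside one kept line.
--     """
--     placeholders = ('placeholder', 'example', 'your_', 'insert_', 'changeme')
--     indicators = ('password=', 'secret=', 'key=', 'token=',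
--                   'api_key=', 'auth_token=', 'private_key=')
--     kept = '\n'.join(
--         line for line in content.lower().split('\n')
--         if not any(p in line for p in placeholders)
--     )
--     return any(ind in kept for ind in indicators)
-- ===== Notes on version B (the rewrite author's own statement) =====
-- stated objective: alternative
-- what changed: B replaces A's nested indicator-over-lines scans by a staged pipeline: lowercase once, filter out the placeholder lines, rejoin the surviving lines with the newline separator, and run a single substring test per indicator over that rejoined text (correct because no indicator contains a newline).
import Mathlib
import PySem

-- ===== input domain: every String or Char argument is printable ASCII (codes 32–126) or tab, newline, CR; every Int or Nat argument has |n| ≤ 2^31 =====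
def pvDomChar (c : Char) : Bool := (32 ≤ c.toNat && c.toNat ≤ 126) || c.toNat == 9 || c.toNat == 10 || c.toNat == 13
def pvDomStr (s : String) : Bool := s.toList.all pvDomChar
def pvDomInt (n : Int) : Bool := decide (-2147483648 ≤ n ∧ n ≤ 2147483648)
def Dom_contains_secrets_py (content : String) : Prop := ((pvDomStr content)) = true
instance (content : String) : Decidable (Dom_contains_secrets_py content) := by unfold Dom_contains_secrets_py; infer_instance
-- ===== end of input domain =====

-- B is a staged pipeline (lowercase once, drop placeholder lines, rejoin with the newline separator, one substring
-- test per indicator on the filtered text) instead of A's nested indicator-over-lines scans;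
-- objective: alternative.

-- ===== PORT A =====
def pvIndicatorsA : List String :=
  ["password=", "secret=", "key=", "token=", "api_key=", "auth_token=", "private_key="]

def pvPlaceholdersA : List String :=
  ["placeholder", "example", "your_", "insert_", "changeme"]

-- the inner 'for line in lines' loop of A, with its continue/return True
def pvSecretLineScanA (ind : String) : List String → Bool
  | [] => false
  | line :: rest =>
    if PySem.Str.isIn ind (PySem.Str.lower line) then
      if pvPlaceholdersA.any (fun p => PySem.Str.isIn p (PySem.Str.lower line)) then
        pvSecretLineScanA ind rest
      else true
    else pvSecretLineScanA ind rest

def contains_secrets_py (content : String) : Bool :=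
  let contentLower := PySem.Str.lower content
  pvIndicatorsA.any (fun ind =>
    PySem.Str.isIn ind contentLower &&
    pvSecretLineScanA ind ((PySem.Str.split? content "\n").getD []))

-- ===== PORT B =====
def pvPlaceholdersB : List String :=
  ["placeholder", "example", "your_", "insert_", "changeme"]

def pvIndicatorsB : List String :=
  ["password=", "secret=", "key=", "token=", "api_key=", "auth_token=", "private_key="]

-- B's line filter: keep the (already lowercased) lines mentioning no placeholder
def pvKeepLineB (line : String) : Bool :=
  !(pvPlaceholdersB.any (fun p => PySem.Str.isIn p line))

def contains_secrets_py_alt (content : String) : Bool :=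
  let kept := PySem.Str.join "\n"
    (((PySem.Str.split? (PySem.Str.lower content) "\n").getD []).filter pvKeepLineB)
  pvIndicatorsB.any (fun ind => PySem.Str.isIn ind kept)

-- ===== PRECONDITION & SPEC =====
def Spec_contains_secrets_py (content : String) (out : Bool) : Prop := out = contains_secrets_py_alt content
instance (content : String) (out : Bool) : Decidable (Spec_contains_secrets_py content out) := by unfold Spec_contains_secrets_py; infer_instance

-- ===== CLAIM (what is proved, stated in full; the proofs are below) =====
def Claim_equal_contains_secrets_py : Prop := ∀ (content : String), Dom_contains_secrets_py content → Spec_contains_secrets_py content (contains_secrets_py content)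

-- ===== LEMMAS AND PROOFS =====

-- lowercasing a char neither produces nor consumes a newline
theorem pv_lowerChar_newline (c : Char) : ('\n' == PySem.Chars.lowerChar c) = ('\n' == c) := by
  unfold PySem.Chars.lowerChar PySem.Chars.isupper
  split_ifs with h
  · rw [Bool.and_eq_true, decide_eq_true_eq, decide_eq_true_eq] at h
    have h1 : 65 ≤ c.toNat := h.1
    have h2 : c.toNat ≤ 90 := h.2
    have hv : Nat.isValidChar (c.toNat + 32) := Or.inl (by omega)
    have ht : (Char.ofNat (c.toNat + 32)).toNat = c.toNat + 32 := by
      simp only [Char.toNat, UInt32.toNat] at hv ⊢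
      simp only [Char.ofNat, Char.ofNatAux]
      rw [dif_pos hv]
      rfl
    have hne : ('\n' == Char.ofNat (c.toNat + 32)) = false := by
      rw [beq_eq_false_iff_ne]
      intro he
      have h10 := congrArg Char.toNat he
      rw [ht] at h10
      have : ('\n').toNat = 10 := by decide
      omega
    have hne2 : ('\n' == c) = false := by
      rw [beq_eq_false_iff_ne]
      intro he
      have h10 := congrArg Char.toNat he.symm
      have : ('\n').toNat = 10 := by decide
      omega
    rw [hne, hne2]
  · rfl

-- splitting on '\n' commutes with per-char lowercasing (the go loop of splitOn)
theorem pv_go_lower (fuel : Nat) :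
    ∀ (l cur : List Char) (acc : List (List Char)),
      PySem.Chars.splitOn.go ['\n'] fuel (l.map PySem.Chars.lowerChar)
        (cur.map PySem.Chars.lowerChar) (acc.map (List.map PySem.Chars.lowerChar)) =
      (PySem.Chars.splitOn.go ['\n'] fuel l cur acc).map (List.map PySem.Chars.lowerChar) := by
  induction fuel with
  | zero =>
    intro l cur acc
    simp [PySem.Chars.splitOn.go, List.map_reverse]
  | succ n ih =>
    intro l cur acc
    cases l with
    | nil => simp [PySem.Chars.splitOn.go, List.map_reverse]
    | cons c rest =>
      simp only [List.map_cons, PySem.Chars.splitOn.go]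
      have hpre : ∀ d : Char, ∀ r : List Char, List.isPrefixOf ['\n'] (d :: r) = ('\n' == d) := by
        intro d r; simp [List.isPrefixOf]
      rw [hpre, hpre, pv_lowerChar_newline]
      by_cases hc : ('\n' == c) = true
      · rw [if_pos hc, if_pos hc]
        simp only [List.length_cons, List.length_nil, List.drop_succ_cons, List.drop_zero]
        have := ih rest [] (cur.reverse :: acc)
        simpa [List.map_reverse] using this
      · rw [if_neg hc, if_neg hc]
        exact ih rest (c :: cur) acc

theorem pv_splitOn_lower (s : List Char) :
    PySem.Chars.splitOn (PySem.Chars.lower s) ['\n'] =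
      (PySem.Chars.splitOn s ['\n']).map PySem.Chars.lower := by
  unfold PySem.Chars.splitOn PySem.Chars.lower
  have hl : (s.map PySem.Chars.lowerChar).length = s.length := by simp
  rw [hl]
  simpa using pv_go_lower (s.length + 1) s [] []

-- a prefix of x ++ c :: y avoiding c is a prefix of x
theorem pv_prefix_append_cons : ∀ (x : List Char) {l y : List Char} {c : Char},
    l <+: x ++ c :: y → c ∉ l → l <+: x := by
  intro x
  induction x with
  | nil =>
    intro l y c h hc
    cases l with
    | nil => exact List.nil_prefix
    | cons a l' =>
      rw [List.nil_append, List.cons_prefix_cons] at h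
      exact absurd (h.1 ▸ List.mem_cons_self) hc
  | cons b x' ih =>
    intro l y c h hc
    cases l with
    | nil => exact List.nil_prefix
    | cons a l' =>
      rw [List.cons_append, List.cons_prefix_cons] at h
      refine List.cons_prefix_cons.mpr ⟨h.1, ih h.2 (fun hm => hc (List.mem_cons_of_mem _ hm))⟩

-- an infix of x ++ c :: y avoiding c lies in x or in y
theorem pv_infix_append_cons : ∀ (x : List Char) {l y : List Char} {c : Char},
    l <:+: x ++ c :: y → c ∉ l → l <:+: x ∨ l <:+: y := by
  intro x
  induction x with
  | nil =>
    intro l y c h hc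
    rw [List.nil_append, List.infix_cons_iff] at h
    rcases h with h | h
    · have := pv_prefix_append_cons [] (by simpa using h) hc
      rw [List.prefix_nil] at this
      exact Or.inr (this ▸ List.nil_infix)
    · exact Or.inr h
  | cons b x' ih =>
    intro l y c h hc
    rw [List.cons_append, List.infix_cons_iff] at h
    rcases h with h | h
    · exact Or.inl (pv_prefix_append_cons (b :: x') (by simpa using h) hc).isInfix
    · rcases ih h hc with h' | h'
      · exact Or.inl (h'.trans (List.suffix_cons b x').isInfix)
      · exact Or.inr h'

-- a nonempty newline-free word is an infix of the '\n'-intercalation iff it is an infix of a piece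
theorem pv_infix_intercalate_iff (l : List Char) (hne : l ≠ []) (hnl : '\n' ∉ l) :
    ∀ ps : List (List Char),
      (l <:+: List.intercalate ['\n'] ps ↔ ∃ p ∈ ps, l <:+: p) := by
  intro ps
  induction ps with
  | nil =>
    simp only [List.intercalate, List.intersperse, List.flatten_nil, List.infix_nil]
    simpa using hne
  | cons p ps ih =>
    cases ps with
    | nil =>
      constructor
      · intro h
        exact ⟨p, List.mem_cons_self, by simpa [List.intercalate, List.intersperse] using h⟩
      · rintro ⟨q, hq, h⟩
        rcases List.mem_cons.mp hq with rfl | hq'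
        · simpa [List.intercalate, List.intersperse] using h
        · simp at hq'
    | cons q ps' =>
      have hint : List.intercalate ['\n'] (p :: q :: ps') =
          p ++ '\n' :: List.intercalate ['\n'] (q :: ps') := by
        simp [List.intercalate, List.intersperse]
      rw [hint]
      constructor
      · intro h
        rcases pv_infix_append_cons p h hnl with h' | h'
        · exact ⟨p, List.mem_cons_self, h'⟩
        · rcases ih.mp h' with ⟨r, hr, hlr⟩
          exact ⟨r, List.mem_cons_of_mem _ hr, hlr⟩
      · rintro ⟨r, hr, hlr⟩
        rcases List.mem_cons.mp hr with rfl | hr'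
        · exact hlr.trans (List.prefix_append r _).isInfix
        · have : l <:+: List.intercalate ['\n'] (q :: ps') := ih.mpr ⟨r, hr', hlr⟩
          exact this.trans ⟨p ++ ['\n'], [], by simp⟩

-- the lines of s.split('\n'), as char lists, are exactly the pieces of Chars.splitOn
theorem pv_lines_toList_eq (content : String) :
    ((PySem.Str.split? content "\n").getD []).map String.toList =
      PySem.Chars.splitOn content.toList ['\n'] := by
  have h := PySem.Str.split?_map content "\n"
  rw [PySem.Chars.split?.eq_1] at h
  rw [if_neg (by simp)] at h
  cases hs : PySem.Str.split? content "\n" with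
  | none => rw [hs] at h; simp at h
  | some ls =>
    rw [hs] at h
    simp only [Option.map_some, Option.some.injEq] at h
    simpa using h

-- every piece produced by PySem.Chars.splitOn.go is in acc, or cur.reverse ++ a prefix of l, or an infix of l
theorem pv_go_mem (sep : List Char) :
    ∀ (fuel : Nat) (l cur : List Char) (acc : List (List Char)) (x : List Char),
      x ∈ PySem.Chars.splitOn.go sep fuel l cur acc →
      x ∈ acc ∨ (∃ y, y <+: l ∧ x = cur.reverse ++ y) ∨ x <:+: l := by
  intro fuel
  induction fuel with
  | zero =>
    intro l cur acc x hx
    simp only [PySem.Chars.splitOn.go] at hx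
    simp only [List.mem_reverse, List.mem_cons] at hx
    rcases hx with h | h
    · exact Or.inr (Or.inl ⟨l, List.prefix_refl l, h⟩)
    · exact Or.inl h
  | succ n ih =>
    intro l cur acc x hx
    cases l with
    | nil =>
      simp only [PySem.Chars.splitOn.go] at hx
      simp only [List.mem_reverse, List.mem_cons] at hx
      rcases hx with h | h
      · exact Or.inr (Or.inl ⟨[], List.nil_prefix, by simpa using h⟩)
      · exact Or.inl h
    | cons c rest =>
      simp only [PySem.Chars.splitOn.go] at hx
      by_cases hpre : sep.isPrefixOf (c :: rest) = true
      · rw [if_pos hpre] at hx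
        rcases ih _ _ _ _ hx with h | ⟨y, hy, hxy⟩ | h
        · rcases List.mem_cons.mp h with h' | h'
          · exact Or.inr (Or.inl ⟨[], List.nil_prefix, by simpa using h'⟩)
          · exact Or.inl h'
        · refine Or.inr (Or.inr ?_)
          rw [hxy]
          simp only [List.reverse_nil, List.nil_append]
          exact hy.isInfix.trans (List.drop_suffix _ _).isInfix
        · exact Or.inr (Or.inr (h.trans (List.drop_suffix _ _).isInfix))
      · rw [if_neg hpre] at hx
        rcases ih _ _ _ _ hx with h | ⟨y, hy, hxy⟩ | h
        · exact Or.inl h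
        · refine Or.inr (Or.inl ⟨c :: y, List.cons_prefix_cons.mpr ⟨rfl, hy⟩, ?_⟩)
          rw [hxy]; simp
        · exact Or.inr (Or.inr (h.trans (List.suffix_cons c rest).isInfix))

theorem pv_mem_splitOn_infix (s sep x : List Char) (hx : x ∈ PySem.Chars.splitOn s sep) :
    x <:+: s := by
  unfold PySem.Chars.splitOn at hx
  rcases pv_go_mem sep _ s [] [] x hx with h | ⟨y, hy, hxy⟩ | h
  · simp at h
  · rw [hxy]; simpa using hy.isInfix
  · exact h

-- if an indicator occurs in a lowered line, it occurs in the lowered whole content (A's outer guard)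
theorem pv_guard_of_line (content line ind : String)
    (hl : line ∈ (PySem.Str.split? content "\n").getD [])
    (hin : ind.toList <:+: PySem.Chars.lower line.toList) :
    PySem.Str.isIn ind (PySem.Str.lower content) = true := by
  rw [PySem.Str.isIn_iff_infix, PySem.Str.toList_lower]
  have hinf : line.toList <:+: content.toList := by
    apply pv_mem_splitOn_infix _ ['\n']
    rw [← pv_lines_toList_eq content]
    exact List.mem_map.mpr ⟨line, hl, rfl⟩
  calc ind.toList <:+: PySem.Chars.lower line.toList := hin
    _ <:+: PySem.Chars.lower content.toList := by
        unfold PySem.Chars.lower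
        exact hinf.map _

-- the inner scan of A as an existential
theorem pv_scanA_iff (ind : String) (ls : List String) :
    pvSecretLineScanA ind ls = true ↔
      ∃ l ∈ ls, PySem.Str.isIn ind (PySem.Str.lower l) = true ∧
        ¬ (pvPlaceholdersA.any (fun p => PySem.Str.isIn p (PySem.Str.lower l)) = true) := by
  induction ls with
  | nil => simp [pvSecretLineScanA]
  | cons l rest ih =>
    by_cases h1 : PySem.Str.isIn ind (PySem.Str.lower l) = true
    · by_cases h2 : pvPlaceholdersA.any (fun p => PySem.Str.isIn p (PySem.Str.lower l)) = true
      · simp only [pvSecretLineScanA, if_pos h1, if_pos h2, ih]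
        constructor
        · rintro ⟨l', hl', h⟩; exact ⟨l', List.mem_cons_of_mem _ hl', h⟩
        · rintro ⟨l', hl', h⟩
          rcases List.mem_cons.mp hl' with rfl | hl'
          · exact absurd h2 h.2
          · exact ⟨l', hl', h⟩
      · simp only [pvSecretLineScanA, if_pos h1, if_neg h2]
        exact ⟨fun _ => ⟨l, List.mem_cons_self, h1, h2⟩, fun _ => trivial⟩
    · simp only [pvSecretLineScanA, if_neg h1, ih]
      constructor
      · rintro ⟨l', hl', h⟩; exact ⟨l', List.mem_cons_of_mem _ hl', h⟩
      · rintro ⟨l', hl', h⟩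
        rcases List.mem_cons.mp hl' with rfl | hl'
        · exact absurd h.1 h1
        · exact ⟨l', hl', h⟩

-- B's result as an existential over the original (unlowered) lines
theorem pv_alt_iff (content : String) :
    contains_secrets_py_alt content = true ↔
      ∃ ind ∈ pvIndicatorsB, ∃ line ∈ (PySem.Str.split? content "\n").getD [],
        ind.toList <:+: PySem.Chars.lower line.toList ∧
        (pvPlaceholdersB.any fun p =>
          PySem.Chars.isIn p.toList (PySem.Chars.lower line.toList)) = false := by
  unfold contains_secrets_py_alt
  simp only [List.any_eq_true]
  have hkept : (PySem.Str.join "\n"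
      (((PySem.Str.split? (PySem.Str.lower content) "\n").getD []).filter pvKeepLineB)).toList =
      List.intercalate ['\n']
        (((PySem.Chars.splitOn content.toList ['\n']).map PySem.Chars.lower).filter
          (fun cs => !(pvPlaceholdersB.any fun p => PySem.Chars.isIn p.toList cs))) := by
    rw [PySem.Str.toList_join]
    have h1 : List.map String.toList
        (((PySem.Str.split? (PySem.Str.lower content) "\n").getD []).filter pvKeepLineB) =
        (((PySem.Str.split? (PySem.Str.lower content) "\n").getD []).map String.toList).filter
          (fun cs => !(pvPlaceholdersB.any fun p => PySem.Chars.isIn p.toList cs)) := by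
      rw [List.filter_map]
      congr 1
    rw [h1, pv_lines_toList_eq, PySem.Str.toList_lower, pv_splitOn_lower]
    rfl
  constructor
  · rintro ⟨ind, hind, hin⟩
    have hfacts : ind.toList ≠ [] ∧ '\n' ∉ ind.toList := by
      simp only [pvIndicatorsB, List.mem_cons, List.not_mem_nil, or_false] at hind
      rcases hind with rfl|rfl|rfl|rfl|rfl|rfl|rfl <;> exact ⟨by decide, by decide⟩
    rw [PySem.Str.isIn_iff_infix, hkept,
      pv_infix_intercalate_iff ind.toList hfacts.1 hfacts.2] at hin
    rcases hin with ⟨cs, hcs, hinf⟩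
    rw [List.mem_filter, List.mem_map] at hcs
    rcases hcs with ⟨⟨t, ht, rfl⟩, hp⟩
    rw [← pv_lines_toList_eq, List.mem_map] at ht
    rcases ht with ⟨line, hline, rfl⟩
    exact ⟨ind, hind, line, hline, hinf, by simpa using hp⟩
  · rintro ⟨ind, hind, line, hline, hinf, hp⟩
    have hfacts : ind.toList ≠ [] ∧ '\n' ∉ ind.toList := by
      simp only [pvIndicatorsB, List.mem_cons, List.not_mem_nil, or_false] at hind
      rcases hind with rfl|rfl|rfl|rfl|rfl|rfl|rfl <;> exact ⟨by decide, by decide⟩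
    refine ⟨ind, hind, ?_⟩
    rw [PySem.Str.isIn_iff_infix, hkept,
      pv_infix_intercalate_iff ind.toList hfacts.1 hfacts.2]
    refine ⟨PySem.Chars.lower line.toList, ?_, hinf⟩
    rw [List.mem_filter, List.mem_map]
    exact ⟨⟨line.toList, by rw [← pv_lines_toList_eq]; exact List.mem_map.mpr ⟨line, hline, rfl⟩, rfl⟩,
      by simpa using hp⟩

-- ===== VERDICT (by name: the statement is the Claim_ definition above) =====
theorem contains_secrets_py_spec : Claim_equal_contains_secrets_py := by
  intro content _
  unfold Spec_contains_secrets_py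
  rw [Bool.eq_iff_iff, pv_alt_iff]
  unfold contains_secrets_py
  simp only [List.any_eq_true, Bool.and_eq_true, pv_scanA_iff,
    PySem.Str.isIn_eq, PySem.Str.toList_lower, PySem.Chars.isIn_iff_infix,
    List.any_eq_false,
    show pvIndicatorsB = pvIndicatorsA from rfl,
    show pvPlaceholdersB = pvPlaceholdersA from rfl]
  constructor
  · rintro ⟨ind, hind, -, line, hline, h1, h2⟩
    exact ⟨ind, hind, line, hline, h1, by simpa [List.any_eq_false, PySem.Chars.isIn_iff_infix] using h2⟩
  · rintro ⟨ind, hind, line, hline, h1, h2⟩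
    refine ⟨ind, hind, ?_, line, hline, h1,
      by simpa [List.any_eq_false, PySem.Chars.isIn_iff_infix] using h2⟩
    have := pv_guard_of_line content line ind hline h1
    simpa [PySem.Str.isIn_eq, PySem.Str.toList_lower, PySem.Chars.isIn_iff_infix] using this
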